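-- pv_equiv track=rewrite | github.com/Liyihwa/safewa | logwa/cfmt.py | __add_color
-- ===== SOURCE A (Python) =====
-- __color_map = {
--     'b': 0,
--     'r': 1,
--     'g': 2,
--     'y': 3,
--     'u': 4,
--     'p': 5,
--     'c': 6,
--     'a': 7,
--     'x': 8
-- }
--
-- def __add_color(source_string, color_string):
--     res = "\033["
--     i = 0
--     while i < len(color_string):
--         if color_string[i] == '_' and i + 1 < len(color_string):
--             color = __color_map.get(color_string[i + 1], None)
--             if color is not None and color != 8:
--                 res += str(color + 40) + ";"
--             i += 2
--         else:
--             color = __color_map.get(color_string[i], None)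
--             if color is not None:
--                 if color == 8:
--                     res += str(1) + ";"
--                 else:
--                     res += str(color + 30) + ";"
--             i += 1
--
--     res = res[0:len(res) - 1] + "m"
--     return res + source_string + "\033[0m"
-- ===== SOURCE B (Python) =====
-- __color_map = {
--     'b': 0,
--     'r': 1,
--     'g': 2,
--     'y': 3,
--     'u': 4,
--     'p': 5,
--     'c': 6,
--     'a': 7,
--     'x': 8
-- }
--
-- # Translation tables built once: letter -> foreground / background ANSI code.
-- _FG = {ch: ('1' if code == 8 else str(30 + code)) for ch, code in __color_map.items()}
-- _BG = {ch: str(40 + code) for ch, code in __color_map.items() if code != 8}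
--
-- def __add_color(source_string, color_string):
--     # Split the spec on '_' and process whole segments: the first character of a
--     # segment that follows an unconsumed '_' is a background color, everything
--     # else is foreground; an empty segment means its '_' swallowed the next '_'.
--     # Each code is emitted with a ';' terminator; the last terminator is trimmed.
--     segments = color_string.split('_')
--     codes = [_FG[c] for c in segments[0] if c in _FG]
--     separator_consumed = False
--     for seg in segments[1:]:
--         if separator_consumed:
--             codes.extend(_FG[c] for c in seg if c in _FG)
--             separator_consumed = False
--         elif seg:
--             if seg[0] in _BG:
--                 codes.append(_BG[seg[0]])
--             codes.extend(_FG[c] for c in seg[1:] if c in _FG)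
--         else:
--             separator_consumed = True
--     res = "\033[" + "".join(code + ";" for code in codes)
--     return res[:-1] + "m" + source_string + "\033[0m"
-- ===== Notes on version B (the rewrite author's own statement) =====
-- stated objective: faster
-- what changed: Replaced A's index-lookahead while-loop that grows the result by repeated string concatenation with a staged pass: split the spec on '_' into segments, translate each segment through foreground/background code tables precomputed at module level, collect the codes in a list and join once at the end.
import Mathlib
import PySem

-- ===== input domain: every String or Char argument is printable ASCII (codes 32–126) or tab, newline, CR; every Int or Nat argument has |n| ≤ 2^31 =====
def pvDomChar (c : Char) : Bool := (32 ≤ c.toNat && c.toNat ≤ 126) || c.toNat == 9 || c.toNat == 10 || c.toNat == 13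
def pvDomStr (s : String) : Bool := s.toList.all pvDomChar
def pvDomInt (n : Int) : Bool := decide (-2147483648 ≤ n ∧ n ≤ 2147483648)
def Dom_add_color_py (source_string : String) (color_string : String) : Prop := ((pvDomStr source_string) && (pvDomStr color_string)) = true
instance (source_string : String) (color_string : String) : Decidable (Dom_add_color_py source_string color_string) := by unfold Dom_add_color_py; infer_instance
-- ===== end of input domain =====

-- B splits the color spec on '_' and translates whole segments through precomputed
-- foreground/background tables, collecting the codes in a list joined once, instead of
-- A's char-by-char while-loop with index lookahead and repeated string concatenation
-- (objective: faster, measured); return values proved equal on all inputs.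

-- ===== PORT A =====
-- the module-level dict __color_map
def pvColorMap : PySem.Dict Char Int :=
  PySem.Dict.ofList [('b', 0), ('r', 1), ('g', 2), ('y', 3), ('u', 4), ('p', 5), ('c', 6), ('a', 7), ('x', 8)]

-- A's while-loop: `i` walks color_string; here the not-yet-consumed suffix replaces the index.
-- Strings are handled as their code-point lists (PySem style); `res` is the accumulator string.
def pvLoopA : List Char → List Char → List Char
  | [], res => res
  | c :: rest, res =>
    if c = '_' ∧ rest ≠ [] then
      match rest with
      | [] => res          -- unreachable (rest ≠ [])
      | d :: rest' =>
        match pvColorMap.get? d with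
        | some color =>
          if color ≠ 8 then pvLoopA rest' (res ++ (PySem.Int.toStr (color + 40)).toList ++ [';'])
          else pvLoopA rest' res
        | none => pvLoopA rest' res
    else
      match pvColorMap.get? c with
      | some color =>
        if color = 8 then pvLoopA rest (res ++ (PySem.Int.toStr 1).toList ++ [';'])
        else pvLoopA rest (res ++ (PySem.Int.toStr (color + 30)).toList ++ [';'])
      | none => pvLoopA rest res

def add_color_py (source_string : String) (color_string : String) : String :=
  let res := pvLoopA color_string.toList "\x1b[".toList
  -- res[0:len(res)-1]: res starts from "\x1b[" and only grows, so it is nonempty and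
  -- the Python slice [0 : len-1] is exactly dropLast
  String.mk (res.dropLast ++ ['m'] ++ source_string.toList ++ "\x1b[0m".toList)

-- ===== PORT B =====
-- the module-level translation tables _FG and _BG of Source B
def pvFG : PySem.Dict Char (List Char) :=
  PySem.Dict.ofList (pvColorMap.items.map (fun p => (p.1, if p.2 = 8 then ['1'] else (PySem.Int.toStr (30 + p.2)).toList)))

def pvBG : PySem.Dict Char (List Char) :=
  PySem.Dict.ofList ((pvColorMap.items.filter (fun p => p.2 != 8)).map (fun p => (p.1, (PySem.Int.toStr (40 + p.2)).toList)))

-- [_FG[c] for c in seg if c in _FG]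
def pvFgCodes (seg : List Char) : List (List Char) :=
  seg.filterMap (fun c => pvFG.get? c)

-- one iteration of Source B's for-loop over the segments; state = (codes, separator_consumed)
def pvSegStep (st : List (List Char) × Bool) (seg : List Char) : List (List Char) × Bool :=
  if st.2 then (st.1 ++ pvFgCodes seg, false)
  else
    match seg with
    | [] => (st.1, true)
    | d :: rest => (st.1 ++ (pvBG.get? d).toList ++ pvFgCodes rest, false)

def add_color_py_alt (source_string : String) (color_string : String) : String :=
  let segments := PySem.Chars.splitOn color_string.toList ['_']
  let codes :=
    match segments with
    | [] => []          -- unreachable: str.split with a separator never returns an empty list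
    | s0 :: rest => (rest.foldl pvSegStep (pvFgCodes s0, false)).1
  -- res = "\033[" + "".join(code + ";" for code in codes); res[:-1] is dropLast (res nonempty)
  let res := "\x1b[".toList ++ codes.flatMap (fun code => code ++ [';'])
  String.mk (res.dropLast ++ ['m'] ++ source_string.toList ++ "\x1b[0m".toList)

-- ===== PRECONDITION & SPEC =====
def Spec_add_color_py (source_string : String) (color_string : String) (out : String) : Prop := out = add_color_py_alt source_string color_string
instance (source_string : String) (color_string : String) (out : String) : Decidable (Spec_add_color_py source_string color_string out) := by unfold Spec_add_color_py; infer_instance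

-- ===== CLAIM (what is proved, stated in full; the proofs are below) =====
def Claim_equal_add_color_py : Prop := ∀ (source_string : String) (color_string : String), Dom_add_color_py source_string color_string → Spec_add_color_py source_string color_string (add_color_py source_string color_string)

-- ===== LEMMAS AND PROOFS =====

-- the common characterization: the list of codes the color spec denotes
def pvCodesOf : List Char → List (List Char)
  | [] => []
  | c :: rest =>
    if c = '_' then
      match rest with
      | [] => []
      | d :: rest' => (pvBG.get? d).toList ++ pvCodesOf rest'
    else (pvFG.get? c).toList ++ pvCodesOf rest

-- A's foreground emission agrees with the _FG table
theorem pv_fg_eq (c : Char) :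
    (match pvColorMap.get? c with
     | some color => if color = 8 then [(PySem.Int.toStr 1).toList] else [(PySem.Int.toStr (color + 30)).toList]
     | none => ([] : List (List Char))) = (pvFG.get? c).toList := by
  have h1 : pvColorMap = PySem.Dict.mk [('b', 0), ('r', 1), ('g', 2), ('y', 3), ('u', 4), ('p', 5), ('c', 6), ('a', 7), ('x', 8)] := by decide
  have h2 : pvFG = PySem.Dict.mk [('b', "30".toList), ('r', "31".toList), ('g', "32".toList), ('y', "33".toList), ('u', "34".toList), ('p', "35".toList), ('c', "36".toList), ('a', "37".toList), ('x', ['1'])] := by decide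
  rw [h1, h2]
  simp only [PySem.Dict.get?_mk_cons, beq_iff_eq]
  split_ifs <;> simp_all [PySem.Dict.get?] <;> decide

-- A's background emission agrees with the _BG table
theorem pv_bg_eq (d : Char) :
    (match pvColorMap.get? d with
     | some color => if color ≠ 8 then [(PySem.Int.toStr (color + 40)).toList] else []
     | none => ([] : List (List Char))) = (pvBG.get? d).toList := by
  have h1 : pvColorMap = PySem.Dict.mk [('b', 0), ('r', 1), ('g', 2), ('y', 3), ('u', 4), ('p', 5), ('c', 6), ('a', 7), ('x', 8)] := by decide
  have h2 : pvBG = PySem.Dict.mk [('b', "40".toList), ('r', "41".toList), ('g', "42".toList), ('y', "43".toList), ('u', "44".toList), ('p', "45".toList), ('c', "46".toList), ('a', "47".toList)] := by decide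
  rw [h1, h2]
  simp only [PySem.Dict.get?_mk_cons, beq_iff_eq]
  split_ifs <;> simp_all [PySem.Dict.get?] <;> decide

-- A's loop appends exactly the codes, each followed by ';'
theorem pv_loopA_eq : ∀ (n : ℕ) (cs : List Char), cs.length ≤ n → ∀ acc,
    pvLoopA cs acc = acc ++ (pvCodesOf cs).flatMap (· ++ [';']) := by
  intro n
  induction n with
  | zero =>
    intro cs h acc
    have : cs = [] := List.length_eq_zero_iff.mp (Nat.le_zero.mp h)
    subst this
    simp [pvLoopA, pvCodesOf]
  | succ n ih =>
    intro cs h acc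
    match cs with
    | [] => simp [pvLoopA, pvCodesOf]
    | c :: rest =>
      by_cases hc : c = '_' ∧ rest ≠ []
      · obtain ⟨hc1, hc2⟩ := hc
        match rest with
        | [] => exact absurd rfl hc2
        | d :: rest' =>
          subst hc1
          have hlen : rest'.length ≤ n := by simp at h; omega
          have hcode : pvCodesOf ('_' :: d :: rest') = (pvBG.get? d).toList ++ pvCodesOf rest' := by
            simp [pvCodesOf]
          rw [hcode, ← pv_bg_eq d]
          rw [show pvLoopA ('_' :: d :: rest') acc
              = (match pvColorMap.get? d with
                 | some color =>
                   if color ≠ 8 then pvLoopA rest' (acc ++ (PySem.Int.toStr (color + 40)).toList ++ [';'])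
                   else pvLoopA rest' acc
                 | none => pvLoopA rest' acc) from by simp [pvLoopA]]
          cases hg : pvColorMap.get? d with
          | none => simpa using ih rest' hlen acc
          | some color =>
            by_cases h8 : color = 8
            · subst h8
              simpa using ih rest' hlen acc
            · simp only [h8, ne_eq, not_false_iff, if_true]
              rw [ih rest' hlen]
              simp [List.append_assoc]
      · have hlen : rest.length ≤ n := by simp at h; omega
        by_cases hund : c = '_'
        · have hrest : rest = [] := by
            by_contra hne; exact hc ⟨hund, hne⟩
          subst hund hrest
          have hnone : pvColorMap.get? '_' = none := by decide
          simp [pvLoopA, pvCodesOf, hnone]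
        · have hcode : pvCodesOf (c :: rest) = (pvFG.get? c).toList ++ pvCodesOf rest := by
            rw [pvCodesOf.eq_def]
            simp only [if_neg hund]
          rw [hcode, ← pv_fg_eq c]
          rw [pvLoopA.eq_def]
          simp only [if_neg hc]
          cases hg : pvColorMap.get? c with
          | none => simpa using ih rest hlen acc
          | some color =>
            dsimp only
            by_cases h8 : color = 8
            · subst h8
              rw [if_pos rfl, ih rest hlen]
              simp [List.append_assoc]
            · rw [if_neg h8, if_neg h8, ih rest hlen]
              simp [List.append_assoc]

-- reference form of str.split('_')
def pvSimpleSplit : List Char → List Char → List (List Char)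
  | pre, [] => [pre]
  | pre, c :: rest => if c = '_' then pre :: pvSimpleSplit [] rest else pvSimpleSplit (pre ++ [c]) rest

theorem pv_go_eq : ∀ (fuel : ℕ) (l cur : List Char) (acc : List (List Char)), l.length < fuel →
    PySem.Chars.splitOn.go ['_'] fuel l cur acc = acc.reverse ++ pvSimpleSplit cur.reverse l := by
  intro fuel
  induction fuel with
  | zero => intro l cur acc h; omega
  | succ fuel ih =>
    intro l cur acc h
    match l with
    | [] => simp [PySem.Chars.splitOn.go, pvSimpleSplit]
    | c :: rest =>
      rw [PySem.Chars.splitOn.go]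
      by_cases hcu : c = '_'
      · subst hcu
        have hpre : (['_'].isPrefixOf ('_' :: rest)) = true := by simp [List.isPrefixOf]
        rw [if_pos hpre]
        have := ih rest [] (cur.reverse :: acc) (by simp at h ⊢; omega)
        simp only [List.length_singleton, List.drop_succ_cons, List.drop_zero] at this ⊢
        simp [this, pvSimpleSplit]
      · have hpre : (['_'].isPrefixOf (c :: rest)) = false := by
          simp [List.isPrefixOf]
          intro hh; exact absurd hh.symm hcu
        rw [if_neg (by simp [hpre])]
        rw [ih rest (c :: cur) acc (by simp at h ⊢; omega)]
        simp [pvSimpleSplit, hcu]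

theorem pv_splitOn_eq (cs : List Char) : PySem.Chars.splitOn cs ['_'] = pvSimpleSplit [] cs := by
  rw [PySem.Chars.splitOn]
  rw [pv_go_eq (cs.length + 1) cs [] [] (by omega)]
  simp

theorem pv_ss_shape : ∀ (cs pre : List Char),
    pvSimpleSplit pre cs = (pre ++ (pvSimpleSplit [] cs).headI) :: (pvSimpleSplit [] cs).tail := by
  intro cs
  induction cs with
  | nil => intro pre; simp [pvSimpleSplit]
  | cons c rest ih =>
    intro pre
    by_cases hcu : c = '_'
    · subst hcu; simp [pvSimpleSplit]
    · simp only [pvSimpleSplit, if_neg hcu]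
      simp only [List.nil_append]
      rw [ih (pre ++ [c]), ih [c]]
      simp

theorem pv_ss_free : ∀ (cs : List Char), ∀ s ∈ pvSimpleSplit [] cs, '_' ∉ s := by
  intro cs
  induction cs with
  | nil => intro s hs; simp [pvSimpleSplit] at hs; simp [hs]
  | cons c rest ih =>
    intro s hs
    by_cases hcu : c = '_'
    · subst hcu
      rw [show pvSimpleSplit [] ('_' :: rest) = [] :: pvSimpleSplit [] rest from by
        simp [pvSimpleSplit]] at hs
      rcases List.mem_cons.mp hs with h | h
      · simp [h]
      · exact ih s h
    · rw [show pvSimpleSplit [] (c :: rest) = pvSimpleSplit [c] rest from by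
        simp [pvSimpleSplit, hcu]] at hs
      rw [pv_ss_shape rest [c]] at hs
      rcases List.mem_cons.mp hs with h | h
      · subst h
        intro hmem
        rcases List.mem_append.mp hmem with h1 | h1
        · simp at h1; exact hcu h1.symm
        · have hh : (pvSimpleSplit [] rest).headI ∈ pvSimpleSplit [] rest := by
            rw [pv_ss_shape rest []]; simp
          exact ih _ hh h1
      · have : s ∈ pvSimpleSplit [] rest := by
          rw [pv_ss_shape rest []]
          exact List.mem_cons_of_mem _ h
        exact ih s this

-- re-joining the segments with '_'
def pvTail (r : List (List Char)) : List Char := (r.map (fun t => '_' :: t)).flatten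

theorem pv_ss_text : ∀ (cs : List Char),
    (pvSimpleSplit [] cs).headI ++ pvTail (pvSimpleSplit [] cs).tail = cs := by
  intro cs
  induction cs with
  | nil => simp [pvSimpleSplit, pvTail]
  | cons c rest ih =>
    have hcons : pvSimpleSplit [] rest = (pvSimpleSplit [] rest).headI :: (pvSimpleSplit [] rest).tail := by
      conv_lhs => rw [pv_ss_shape rest []]
      simp
    by_cases hcu : c = '_'
    · subst hcu
      rw [show pvSimpleSplit [] ('_' :: rest) = [] :: pvSimpleSplit [] rest from by
        simp [pvSimpleSplit]]
      simp only [List.headI_cons, List.tail_cons, List.nil_append]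
      conv_lhs => rw [hcons]
      simp only [pvTail, List.map_cons, List.flatten_cons, List.cons_append]
      rw [show ((pvSimpleSplit [] rest).tail.map (fun t => '_' :: t)).flatten
          = pvTail (pvSimpleSplit [] rest).tail from rfl]
      rw [ih]
    · rw [show pvSimpleSplit [] (c :: rest) = pvSimpleSplit [c] rest from by
        simp [pvSimpleSplit, hcu]]
      rw [pv_ss_shape rest [c]]
      simp only [List.headI_cons, List.tail_cons, List.cons_append, List.nil_append]
      rw [ih]

theorem pv_codesOf_append (s t : List Char) (h : '_' ∉ s) :
    pvCodesOf (s ++ t) = pvFgCodes s ++ pvCodesOf t := by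
  induction s with
  | nil => simp [pvFgCodes]
  | cons c s' ih =>
    simp only [List.mem_cons, not_or] at h
    have hc : ¬ c = '_' := fun e => h.1 e.symm
    rw [List.cons_append, pvCodesOf.eq_def]
    simp only [if_neg hc]
    rw [ih (by simpa using h.2)]
    cases hg : pvFG.get? c <;> simp [pvFgCodes, hg]

theorem pv_fold_eq : ∀ (r : List (List Char)), (∀ s ∈ r, '_' ∉ s) → ∀ codes,
    ((r.foldl pvSegStep (codes, false)).1 = codes ++ pvCodesOf (pvTail r)) ∧
    ((r.foldl pvSegStep (codes, true)).1 =
      codes ++ pvCodesOf (match r with | [] => [] | s :: r' => s ++ pvTail r')) := by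
  intro r
  induction r with
  | nil => intro _ codes; simp [pvTail, pvCodesOf]
  | cons s r' ih =>
    intro hfree codes
    have hfree' : ∀ u ∈ r', '_' ∉ u := fun u hu => hfree u (List.mem_cons_of_mem _ hu)
    have hfs : '_' ∉ s := hfree s List.mem_cons_self
    refine ⟨?_, ?_⟩
    · rw [List.foldl_cons]
      match s with
      | [] =>
        rw [show pvSegStep (codes, false) [] = (codes, true) from rfl]
        rw [(ih hfree' codes).2]
        match r' with
        | [] => simp [pvTail, pvCodesOf]
        | s2 :: r2 =>
          have hbg : pvBG.get? '_' = none := by decide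
          have htail : pvTail ([] :: s2 :: r2) = '_' :: '_' :: (s2 ++ pvTail r2) := by
            simp [pvTail]
          rw [htail]
          simp [pvCodesOf, hbg]
      | d :: s1 =>
        rw [show pvSegStep (codes, false) (d :: s1)
            = (codes ++ (pvBG.get? d).toList ++ pvFgCodes s1, false) from rfl]
        rw [(ih hfree' _).1]
        have hfs1 : '_' ∉ s1 := fun hm => hfs (List.mem_cons_of_mem _ hm)
        have htail : pvTail ((d :: s1) :: r') = '_' :: d :: (s1 ++ pvTail r') := by
          simp [pvTail]
        rw [htail]
        rw [show pvCodesOf ('_' :: d :: (s1 ++ pvTail r'))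
            = (pvBG.get? d).toList ++ pvCodesOf (s1 ++ pvTail r') from by simp [pvCodesOf]]
        rw [pv_codesOf_append s1 _ hfs1]
        simp [List.append_assoc]
    · rw [List.foldl_cons]
      rw [show pvSegStep (codes, true) s = (codes ++ pvFgCodes s, false) from rfl]
      rw [(ih hfree' _).1]
      rw [pv_codesOf_append s _ hfs]
      simp [List.append_assoc]

-- B's code list is the common characterization
theorem pv_altB_codes (cs : List Char) :
    (match PySem.Chars.splitOn cs ['_'] with
     | [] => []
     | s0 :: rest => (rest.foldl pvSegStep (pvFgCodes s0, false)).1) = pvCodesOf cs := by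
  rw [pv_splitOn_eq, pv_ss_shape cs []]
  simp only [List.nil_append]
  have hfreeT : ∀ s ∈ (pvSimpleSplit [] cs).tail, '_' ∉ s := by
    intro s hs
    refine pv_ss_free cs s ?_
    rw [pv_ss_shape cs []]
    exact List.mem_cons_of_mem _ hs
  rw [(pv_fold_eq _ hfreeT _).1]
  have hfreeH : '_' ∉ (pvSimpleSplit [] cs).headI := by
    refine pv_ss_free cs _ ?_
    rw [pv_ss_shape cs []]; simp
  rw [← pv_codesOf_append _ _ hfreeH, pv_ss_text cs]

-- ===== VERDICT (by name: the statement is the Claim_ definition above) =====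
theorem add_color_py_spec : Claim_equal_add_color_py := by
  intro source_string color_string _
  unfold Spec_add_color_py add_color_py add_color_py_alt
  dsimp only
  rw [pv_loopA_eq color_string.toList.length _ le_rfl, pv_altB_codes]
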